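-- pv_equiv track=rewrite | github.com/skrinsky/ai-music-full-pipeline | training/pre_chorale_dense.py | chord_token_to_label
-- ===== SOURCE A (Python) =====
-- CHORD_QUALITY_OFFSETS = {
--     "major":      0,
--     "minor":      12,
--     "diminished": 24,
--     "augmented":  36,
-- }
--
-- CHORD_OTHER = 48   # unrecognized quality
--
-- CHORD_REST = 49    # all voices resting
--
-- _PC_NAMES = ["C", "C#", "D", "D#", "E", "F", "F#", "G", "G#", "A", "A#", "B"]
--
-- def chord_token_to_label(chord_local: int) -> str:
--     """Convert a local chord index (0-49) to a human-readable label."""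
--     if chord_local == CHORD_REST:
--         return "REST_CHORD"
--     if chord_local == CHORD_OTHER:
--         return "OTHER_CHORD"
--     for quality, offset in CHORD_QUALITY_OFFSETS.items():
--         if offset <= chord_local < offset + 12:
--             root_pc = chord_local - offset
--             return f"{_PC_NAMES[root_pc]}_{quality}"
--     return f"CHORD_{chord_local}"
-- ===== SOURCE B (Python) =====
-- CHORD_QUALITY_OFFSETS = {
--     "major":      0,
--     "minor":      12,
--     "diminished": 24,
--     "augmented":  36,
-- }
--
-- CHORD_OTHER = 48
-- CHORD_REST = 49
--
-- _PC_NAMES = ["C", "C#", "D", "D#", "E", "F", "F#", "G", "G#", "A", "A#", "B"]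
--
-- _QUALITY_NAMES = list(CHORD_QUALITY_OFFSETS)
--
-- def chord_token_to_label(chord_local: int) -> str:
--     if chord_local == CHORD_REST:
--         return "REST_CHORD"
--     if chord_local == CHORD_OTHER:
--         return "OTHER_CHORD"
--     if 0 <= chord_local < 48:
--         quality_index, root_pc = divmod(chord_local, 12)
--         return f"{_PC_NAMES[root_pc]}_{_QUALITY_NAMES[quality_index]}"
--     return f"CHORD_{chord_local}"
-- ===== Notes on version B (the rewrite author's own statement) =====
-- stated objective: simpler
-- what changed: Replaces the scan over CHORD_QUALITY_OFFSETS with closed-form divmod(chord_local, 12) indexing into the pitch-class and quality-name tables.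
import Mathlib
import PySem

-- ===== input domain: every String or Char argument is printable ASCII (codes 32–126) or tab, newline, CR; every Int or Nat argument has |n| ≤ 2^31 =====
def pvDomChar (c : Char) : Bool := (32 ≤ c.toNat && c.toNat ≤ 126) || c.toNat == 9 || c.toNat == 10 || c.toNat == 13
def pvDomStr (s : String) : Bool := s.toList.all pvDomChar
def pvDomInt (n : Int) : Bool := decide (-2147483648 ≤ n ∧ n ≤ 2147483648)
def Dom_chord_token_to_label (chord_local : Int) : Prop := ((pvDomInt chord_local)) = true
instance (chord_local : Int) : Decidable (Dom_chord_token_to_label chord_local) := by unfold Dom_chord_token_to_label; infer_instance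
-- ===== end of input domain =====

-- B replaces A's scan over CHORD_QUALITY_OFFSETS with closed-form divmod indexing (objective: simpler).

-- ===== PORT A =====
def pvPCNames : List String := ["C", "C#", "D", "D#", "E", "F", "F#", "G", "G#", "A", "A#", "B"]

def pvQualityOffsets : List (String × Int) :=
  [("major", 0), ("minor", 12), ("diminished", 24), ("augmented", 36)]

-- the for-loop over CHORD_QUALITY_OFFSETS.items(); the guard keeps root_pc in 0..11 so pyGet? never returns none
def pvChordScan : List (String × Int) → Int → Option String
  | [], _ => none
  | (quality, offset) :: rest, n =>
    if offset ≤ n ∧ n < offset + 12 then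
      some (((PySem.List.pyGet? pvPCNames (n - offset)).getD "") ++ "_" ++ quality)
    else pvChordScan rest n

def chord_token_to_label (chord_local : Int) : String :=
  if chord_local == 49 then "REST_CHORD"
  else if chord_local == 48 then "OTHER_CHORD"
  else
    match pvChordScan pvQualityOffsets chord_local with
    | some s => s
    | none => "CHORD_" ++ PySem.Int.toStr chord_local

-- ===== PORT B =====
def pvQualityNames : List String := ["major", "minor", "diminished", "augmented"]

def chord_token_to_label_alt (chord_local : Int) : String :=
  if chord_local == 49 then "REST_CHORD"
  else if chord_local == 48 then "OTHER_CHORD"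
  else if 0 ≤ chord_local ∧ chord_local < 48 then
    -- divmod(chord_local, 12); the guard keeps both indices in range so pyGet? never returns none
    let quality_index := PySem.Int.floordiv chord_local 12
    let root_pc := PySem.Int.mod chord_local 12
    ((PySem.List.pyGet? pvPCNames root_pc).getD "") ++ "_" ++
      ((PySem.List.pyGet? pvQualityNames quality_index).getD "")
  else "CHORD_" ++ PySem.Int.toStr chord_local

-- ===== PRECONDITION & SPEC =====
def Spec_chord_token_to_label (chord_local : Int) (out : String) : Prop := out = chord_token_to_label_alt chord_local
instance (chord_local : Int) (out : String) : Decidable (Spec_chord_token_to_label chord_local out) := by unfold Spec_chord_token_to_label; infer_instance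

-- ===== CLAIM (what is proved, stated in full; the proofs are below) =====
def Claim_equal_chord_token_to_label : Prop := ∀ (chord_local : Int), Dom_chord_token_to_label chord_local → Spec_chord_token_to_label chord_local (chord_token_to_label chord_local)

-- ===== LEMMAS AND PROOFS =====

-- outside 0..47 the scan finds nothing
theorem pvChordScan_none (n : Int) (h : n < 0 ∨ 48 ≤ n) :
    pvChordScan pvQualityOffsets n = none := by
  simp only [pvQualityOffsets, pvChordScan]
  rw [if_neg (by omega), if_neg (by omega), if_neg (by omega), if_neg (by omega)]

-- ===== VERDICT (by name: the statement is the Claim_ definition above) =====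
theorem chord_token_to_label_spec : Claim_equal_chord_token_to_label := by
  intro n _
  unfold Spec_chord_token_to_label
  by_cases hin : 0 ≤ n ∧ n < 50
  · obtain ⟨h0, h1⟩ := hin
    interval_cases n <;> rfl
  · have hrange : n < 0 ∨ 48 ≤ n := by omega
    unfold chord_token_to_label chord_token_to_label_alt
    have h49 : (n == 49) = decide (n = 49) := rfl
    have h48 : (n == 48) = decide (n = 48) := rfl
    rw [pvChordScan_none n hrange]
    by_cases e49 : n = 49
    · simp [e49]
    · by_cases e48 : n = 48
      · simp [e48]
      · rw [if_neg (by simpa using e49), if_neg (by simpa using e48),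
            if_neg (by simpa using e49), if_neg (by simpa using e48),
            if_neg (by omega)]
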